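-- pv_equiv track=rewrite | github.com/smeruelo/coding-challenges | cses/two knights/two_knights.py | knights
-- ===== SOURCE A (Python) =====
-- def knights(n):
--     def two_in_border(k, border_cells):
--         threatened = 0 if k < 3 else 2
--         return ((border_cells - 1) * border_cells) // 2 - threatened
--
--     def one_in_border_one_inside(k, border_cells):
--         threatened = 0 if k < 3 else 2 + 2 * (10 + 4 * (k - 5))
--         return (k - 1) * (k - 1) * border_cells - threatened
--
--     output = [0]
--     for k in range(2, n + 1):
--         border_cells = (k * 2) - 1
--         output.append(two_in_border(k, border_cells) +
--                       one_in_border_one_inside(k, border_cells) +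
--                       output[-1])
--     return output
-- ===== SOURCE B (Python) =====
-- def knights(n):
--     return [0] + [(k * k * (k * k - 1)) // 2 - 4 * (k - 1) * (k - 2)
--                   for k in range(2, n + 1)]
-- ===== Notes on version B (the rewrite author's own statement) =====
-- stated objective: simpler
-- what changed: Replaces the cumulative recurrence (running total with two border-counting helper functions and threatened-case deltas) by a direct closed-form polynomial evaluated independently for each board size, in a single list comprehension.
import Mathlib
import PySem

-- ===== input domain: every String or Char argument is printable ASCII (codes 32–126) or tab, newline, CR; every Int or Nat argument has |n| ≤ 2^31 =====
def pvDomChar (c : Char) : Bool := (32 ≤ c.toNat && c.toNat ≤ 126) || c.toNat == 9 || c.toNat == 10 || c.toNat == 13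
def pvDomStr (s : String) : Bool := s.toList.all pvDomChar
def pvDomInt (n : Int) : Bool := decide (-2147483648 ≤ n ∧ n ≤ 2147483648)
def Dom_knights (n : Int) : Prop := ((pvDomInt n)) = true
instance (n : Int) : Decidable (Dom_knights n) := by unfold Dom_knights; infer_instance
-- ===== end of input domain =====

-- B replaces A's cumulative recurrence (running total + two border-counting helpers) by the
-- independent closed form per board size, in a single comprehension (objective: simpler).

-- ===== PORT A =====
def knights_twoInBorder (k border_cells : Int) : Int :=
  let threatened : Int := if k < 3 then 0 else 2
  PySem.Int.floordiv ((border_cells - 1) * border_cells) 2 - threatened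

def knights_oneInBorderOneInside (k border_cells : Int) : Int :=
  let threatened : Int := if k < 3 then 0 else 2 + 2 * (10 + 4 * (k - 5))
  (k - 1) * (k - 1) * border_cells - threatened

-- border_cells = k*2 - 1 inlined; output[-1] ported as getLastD 0: the accumulator always
-- contains its seed 0, so Python's output[-1] never raises and getLastD's default is never used
def knights_body (output : List Int) (k : Int) : List Int :=
  output ++ [knights_twoInBorder k (k * 2 - 1) +
             knights_oneInBorderOneInside k (k * 2 - 1) +
             output.getLastD 0]

def knights (n : Int) : List Int :=
  (PySem.List.pyRange 2 (n + 1) 1).foldl knights_body [0]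

-- ===== PORT B =====
def knights_f (k : Int) : Int :=
  PySem.Int.floordiv (k * k * (k * k - 1)) 2 - 4 * (k - 1) * (k - 2)

def knights_alt (n : Int) : List Int :=
  [0] ++ (PySem.List.pyRange 2 (n + 1) 1).map knights_f

-- ===== PRECONDITION & SPEC =====
def Spec_knights (n : Int) (out : List Int) : Prop := out = knights_alt n
instance (n : Int) (out : List Int) : Decidable (Spec_knights n out) := by unfold Spec_knights; infer_instance

-- ===== CLAIM (what is proved, stated in full; the proofs are below) =====
def Claim_equal_knights : Prop := ∀ (n : Int), Dom_knights n → Spec_knights n (knights n)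

-- ===== LEMMAS AND PROOFS =====

theorem pv_fdiv_two (a m : Int) (h : a = m + m) : PySem.Int.floordiv a 2 = m := by
  rw [PySem.Int.floordiv_eq_iff_of_pos (by norm_num)]
  omega

-- the delta A adds at board size k equals the difference of B's closed form
theorem knights_step (k : Int) (hk : 2 ≤ k) :
    knights_f k = knights_f (k - 1) +
      (knights_twoInBorder k (k * 2 - 1) + knights_oneInBorderOneInside k (k * 2 - 1)) := by
  obtain ⟨r, hr⟩ := Int.even_mul_succ_self (k * k - 1)
  obtain ⟨s, hs⟩ := Int.even_mul_succ_self ((k - 1) * (k - 1) - 1)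
  have h1 : PySem.Int.floordiv (k * k * (k * k - 1)) 2 = r :=
    pv_fdiv_two _ _ (by linear_combination hr)
  have h2 : PySem.Int.floordiv ((k - 1) * (k - 1) * ((k - 1) * (k - 1) - 1)) 2 = s :=
    pv_fdiv_two _ _ (by linear_combination hs)
  have h3 : PySem.Int.floordiv ((k * 2 - 1 - 1) * (k * 2 - 1)) 2 = (k - 1) * (2 * k - 1) :=
    pv_fdiv_two _ _ (by ring)
  unfold knights_f knights_twoInBorder knights_oneInBorderOneInside
  rcases eq_or_lt_of_le hk with h2k | h3k
  · subst_vars; decide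
  · rw [if_neg (by omega), if_neg (by omega), h1, h2, h3]
    have key : 2 * (r - 4 * (k - 1) * (k - 2)) =
        2 * ((s - 4 * (k - 1 - 1) * (k - 1 - 2)) +
          ((k - 1) * (2 * k - 1) - 2 +
           ((k - 1) * (k - 1) * (k * 2 - 1) - (2 + 2 * (10 + 4 * (k - 5)))))) := by
      linear_combination hs - hr
    exact mul_left_cancel₀ (by norm_num : (2 : Int) ≠ 0) key

theorem knights_loop (j : Nat) :
    (PySem.List.pyRange 2 (2 + (j : Int)) 1).foldl knights_body [0]
      = 0 :: (PySem.List.pyRange 2 (2 + (j : Int)) 1).map knights_f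
    ∧ (0 :: (PySem.List.pyRange 2 (2 + (j : Int)) 1).map knights_f).getLastD 0
      = knights_f (1 + (j : Int)) := by
  induction j with
  | zero =>
    refine ⟨?_, ?_⟩ <;> rw [PySem.List.pyRange_one_eq_nil (by omega)]
    · rfl
    · decide
  | succ j ih =>
    have hc : ((2 : Int) + ((j : Nat) + 1 : Nat)) = 2 + (j : Int) + 1 := by push_cast; ring
    have hsplit : PySem.List.pyRange 2 (2 + ((j : Nat) + 1 : Nat) : Int) 1
        = PySem.List.pyRange 2 (2 + (j : Int)) 1 ++ [2 + (j : Int)] := by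
      rw [hc, PySem.List.pyRange_one_succ_right (a := 2) (b := 2 + (j : Int)) (by omega)]
    have hst := knights_step (2 + (j : Int)) (by omega)
    have he : (2 : Int) + (j : Int) - 1 = 1 + (j : Int) := by ring
    rw [he] at hst
    have hbody : knights_body (0 :: (PySem.List.pyRange 2 (2 + (j : Int)) 1).map knights_f)
        (2 + (j : Int))
        = 0 :: ((PySem.List.pyRange 2 (2 + (j : Int)) 1).map knights_f
            ++ [knights_f (2 + (j : Int))]) := by
      unfold knights_body
      rw [ih.2]
      have hx : knights_twoInBorder (2 + (j : Int)) ((2 + (j : Int)) * 2 - 1) +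
          knights_oneInBorderOneInside (2 + (j : Int)) ((2 + (j : Int)) * 2 - 1) +
          knights_f (1 + (j : Int)) = knights_f (2 + (j : Int)) := by linarith [hst]
      rw [hx]
      simp
    rw [hsplit, List.foldl_append, List.map_append, ih.1]
    refine ⟨?_, ?_⟩
    · simp only [List.foldl_cons, List.foldl_nil]
      rw [hbody]
      simp
    · have hd : ((1 : Int) + ((j : Nat) + 1 : Nat)) = 2 + (j : Int) := by push_cast; ring
      rw [hd]
      have hcc : (0 : Int) :: ((PySem.List.pyRange 2 (2 + (j : Int)) 1).map knights_f
            ++ [knights_f (2 + (j : Int))])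
          = ((0 : Int) :: (PySem.List.pyRange 2 (2 + (j : Int)) 1).map knights_f)
            ++ [knights_f (2 + (j : Int))] := by simp
      simp only [List.map_cons, List.map_nil, List.getLastD_eq_getLast?, hcc,
        List.getLast?_concat, Option.getD_some]

-- ===== VERDICT (by name: the statement is the Claim_ definition above) =====
theorem knights_spec : Claim_equal_knights := by
  intro n _
  unfold Spec_knights knights knights_alt
  by_cases h : n + 1 ≤ 2
  · rw [PySem.List.pyRange_one_eq_nil h]
    rfl
  · have hj : n + 1 = 2 + (((n - 1).toNat : Nat) : Int) := by omega
    rw [hj, List.singleton_append]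
    exact (knights_loop (n - 1).toNat).1
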